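-- pv_equiv track=rewrite | github.com/VMASPAD/Sistema-de-Gestion-de-recursos-humanos-15-Grupo-9 | CRUD/editar.py | Es_Entero
-- ===== SOURCE A (Python) =====
-- def Es_Entero(valor):
--     if len(valor) == 0:
--         return False
--     i = 0
--     if valor[0] == '-':
--         if len(valor) == 1:
--             return False
--         i = 1
--     while i < len(valor):
--         c = valor[i]
--         if c < '0' or c > '9':
--             return False
--         i += 1
--     return True
-- ===== SOURCE B (Python) =====
-- import re
--
-- def Es_Entero(valor):
--     return bool(re.fullmatch(r'-?[0-9]+', valor))
-- ===== Notes on version B (the rewrite author's own statement) =====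
-- stated objective: idiomatic
-- what changed: Replaces the manual sign guard and index-based character scan with a single re.fullmatch of the regex -?[0-9]+ ([0-9] avoids Unicode digits), letting the regex engine handle the optional minus and at-least-one-digit requirement.
import Mathlib
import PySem

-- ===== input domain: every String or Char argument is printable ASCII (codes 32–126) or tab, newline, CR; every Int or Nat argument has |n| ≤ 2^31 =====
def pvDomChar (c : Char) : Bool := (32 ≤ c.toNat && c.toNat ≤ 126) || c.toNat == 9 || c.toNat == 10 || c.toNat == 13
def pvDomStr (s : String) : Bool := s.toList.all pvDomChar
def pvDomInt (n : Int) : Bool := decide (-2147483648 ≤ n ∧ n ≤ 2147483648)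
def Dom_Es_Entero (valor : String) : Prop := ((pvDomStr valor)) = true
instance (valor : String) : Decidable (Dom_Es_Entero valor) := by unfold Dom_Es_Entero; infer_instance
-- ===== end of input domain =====

-- B replaces A's manual sign guard and index scan with a single regex fullmatch (-?[0-9]+); idiomatic, same behaviour.


-- ===== PORT A =====
-- the while loop over indices i..len-1, checking each char is in '0'..'9'
def Es_Entero.loop : List Char → Bool
  | [] => true
  | c :: rest => if c < '0' || '9' < c then false else Es_Entero.loop rest

def Es_Entero (valor : String) : Bool :=
  match valor.toList with
  | [] => false
  | c :: rest =>
    if c = '-' then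
      if rest = [] then false else Es_Entero.loop rest
    else Es_Entero.loop (c :: rest)

-- ===== PORT B =====
-- hand-port of re.fullmatch(r'-?[0-9]+', valor): '-?' consumes an optional leading '-',
-- '[0-9]+' requires the remainder to be nonempty and all ASCII digits (exact for this regex).
def Es_Entero_alt (valor : String) : Bool :=
  let cs := valor.toList
  let body := if cs.head? = some '-' then cs.tail else cs
  decide (body ≠ []) && body.all (fun c => decide ('0' ≤ c) && decide (c ≤ '9'))

-- ===== PRECONDITION & SPEC =====
def Spec_Es_Entero (valor : String) (out : Bool) : Prop := out = Es_Entero_alt valor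
instance (valor : String) (out : Bool) : Decidable (Spec_Es_Entero valor out) := by unfold Spec_Es_Entero; infer_instance

-- ===== CLAIM (what is proved, stated in full; the proofs are below) =====
def Claim_equal_Es_Entero : Prop := ∀ (valor : String), Dom_Es_Entero valor → Spec_Es_Entero valor (Es_Entero valor)

-- ===== LEMMAS AND PROOFS =====
theorem Es_Entero_loop_eq_all (l : List Char) :
    Es_Entero.loop l = l.all (fun c => decide ('0' ≤ c) && decide (c ≤ '9')) := by
  induction l with
  | nil => rfl
  | cons c rest ih =>
    simp only [Es_Entero.loop, List.all_cons, ih]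
    by_cases h1 : c < '0'
    · simp [h1, not_le.mpr h1]
    · by_cases h2 : '9' < c
      · simp [h1, h2, not_le.mpr h2]
      · simp [h1, h2, le_of_not_gt h1, le_of_not_gt h2]

-- ===== VERDICT (by name: the statement is the Claim_ definition above) =====
theorem Es_Entero_spec : Claim_equal_Es_Entero := by
  intro valor _
  unfold Spec_Es_Entero Es_Entero Es_Entero_alt
  cases h : valor.toList with
  | nil => simp
  | cons c rest =>
    by_cases hc : c = '-'
    · cases rest with
      | nil => simp [hc]
      | cons d r => simp [hc, Es_Entero_loop_eq_all]
    · simp [hc, Es_Entero_loop_eq_all]
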